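-- pv_equiv track=rewrite | github.com/alexandersumer/gto-poker-trainer | src/gto_trainer/dynamic/cards.py | _canonical_suit_order
-- ===== SOURCE A (Python) =====
-- from collections.abc import Iterable, Sequence
--
-- def _canonical_suit_order(cards: Sequence[int]) -> list[int]:
--     """Return suits in deterministic priority for canonical remapping."""
--
--     ordered: list[int] = []
--     # Highest rank first; break ties by suit index to keep ordering stable.
--     indices = sorted(range(len(cards)), key=lambda i: (cards[i] // 4, cards[i] % 4), reverse=True)
--     for idx in indices:
--         suit = cards[idx] % 4
--         if suit not in ordered:
--             ordered.append(suit)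
--     return ordered
-- ===== SOURCE B (Python) =====
-- def _canonical_suit_order(cards):
--     """Return suits in deterministic priority for canonical remapping.
--
--     One pass: keep the highest card seen per suit, then sort the (at most 4)
--     suits by that best card, highest first.  Because a card's value determines
--     both its rank and suit, the best-card values of distinct suits are
--     distinct, so the ordering is exactly A's (rank, then suit, descending).
--     """
--     best = {}
--     for c in cards:
--         s = c % 4
--         if s not in best or c > best[s]:
--             best[s] = c
--     return sorted(best, key=lambda s: best[s], reverse=True)
-- ===== Notes on version B (the rewrite author's own statement) =====
-- stated objective: faster
-- what changed: Instead of sorting all indices by (rank, suit) and deduplicating suits, B makes one pass recording the highest card per suit in a dict and then sorts the at most 4 suits by that best card, descending.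
import Mathlib
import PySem

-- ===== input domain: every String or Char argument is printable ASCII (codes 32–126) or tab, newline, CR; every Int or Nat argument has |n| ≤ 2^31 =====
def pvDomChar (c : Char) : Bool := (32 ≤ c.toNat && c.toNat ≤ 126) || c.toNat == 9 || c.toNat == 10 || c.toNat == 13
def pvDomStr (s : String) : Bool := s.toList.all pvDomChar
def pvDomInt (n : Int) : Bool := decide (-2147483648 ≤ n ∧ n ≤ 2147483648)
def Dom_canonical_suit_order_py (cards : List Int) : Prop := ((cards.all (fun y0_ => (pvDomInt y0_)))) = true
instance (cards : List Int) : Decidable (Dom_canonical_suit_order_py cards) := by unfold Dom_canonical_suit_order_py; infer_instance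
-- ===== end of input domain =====

-- B replaces A's full index sort by one pass keeping the best card per suit, then sorts the ≤4 suits (objective: faster).


-- ===== PORT A =====
-- sorted(range(len(cards)), key=lambda i: (cards[i] // 4, cards[i] % 4), reverse=True), then
-- collect each suit the first time it is seen.  cards[i] is ported with pyGetD: every index the
-- range produces is in range, so the default is never used and the port is exact.
def canonical_suit_order_py (cards : List Int) : List Int :=
  let indices := PySem.List.sorted2 (PySem.List.pyRange 0 (PySem.List.len cards) 1)
      (fun i => PySem.Int.floordiv (PySem.List.pyGetD cards i 0) 4)
      (fun i => PySem.Int.mod (PySem.List.pyGetD cards i 0) 4) true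
  indices.foldl (fun ordered idx =>
    let suit := PySem.Int.mod (PySem.List.pyGetD cards idx 0) 4
    if suit ∈ ordered then ordered else ordered ++ [suit]) []

-- ===== PORT B =====
-- one pass: best card per suit in a dict; `best[s]` in Python is only evaluated when s is a key
-- (short-circuit `or`), so getD is exact; iterating the dict in sorted() iterates its keys in
-- insertion order.
def canonical_suit_order_py_alt (cards : List Int) : List Int :=
  let best := cards.foldl (fun (d : PySem.Dict Int Int) c =>
      let s := PySem.Int.mod c 4
      if (!(d.contains s) || decide (d.getD s 0 < c)) then d.insert s c else d)
    PySem.Dict.empty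
  PySem.List.sorted best.keys (fun s => best.getD s 0) true

-- ===== PRECONDITION & SPEC =====
def Spec_canonical_suit_order_py (cards : List Int) (out : List Int) : Prop := out = canonical_suit_order_py_alt cards
instance (cards : List Int) (out : List Int) : Decidable (Spec_canonical_suit_order_py cards out) := by unfold Spec_canonical_suit_order_py; infer_instance

-- ===== CLAIM (what is proved, stated in full; the proofs are below) =====
def Claim_equal_canonical_suit_order_py : Prop := ∀ (cards : List Int), Dom_canonical_suit_order_py cards → Spec_canonical_suit_order_py cards (canonical_suit_order_py cards)

-- ===== LEMMAS AND PROOFS =====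

-- the suit of a card
def pvSuit (c : Int) : Int := PySem.Int.mod c 4

-- the loop body of B's dict pass
def pvStep (d : PySem.Dict Int Int) (c : Int) : PySem.Dict Int Int :=
  if (!(d.contains (pvSuit c)) || decide (d.getD (pvSuit c) 0 < c)) then d.insert (pvSuit c) c else d

-- v is the best (highest) card of suit s in l
def pvIsBest (l : List Int) (s v : Int) : Prop :=
  v ∈ l ∧ pvSuit v = s ∧ ∀ c ∈ l, pvSuit c = s → c ≤ v

-- the tuple key (card // 4, card % 4) compares exactly like the card value
theorem pvKeyLt (x y : Int) :
    (decide (PySem.Int.floordiv x 4 < PySem.Int.floordiv y 4) ||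
      (!decide (PySem.Int.floordiv y 4 < PySem.Int.floordiv x 4) &&
        decide (PySem.Int.mod x 4 < PySem.Int.mod y 4))) = decide (x < y) := by
  have hx := PySem.Int.floordiv_mul_add_mod x 4
  have hy := PySem.Int.floordiv_mul_add_mod y 4
  have hx1 := PySem.Int.mod_nonneg x (by norm_num : (0:Int) < 4)
  have hx2 := PySem.Int.mod_lt x (by norm_num : (0:Int) < 4)
  have hy1 := PySem.Int.mod_nonneg y (by norm_num : (0:Int) < 4)
  have hy2 := PySem.Int.mod_lt y (by norm_num : (0:Int) < 4)
  rw [Bool.eq_iff_iff]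
  simp only [Bool.or_eq_true, Bool.and_eq_true, Bool.not_eq_true', decide_eq_true_eq,
    decide_eq_false_iff_not]
  omega

-- mapping through an insertBy whose test factors through the map
theorem pvMapInsertBy {α β : Type} (f : α → β) (p : β → β → Bool) (x : α) (ys : List α) :
    (PySem.List.insertBy (fun a b => p (f a) (f b)) x ys).map f
      = PySem.List.insertBy p (f x) (ys.map f) := by
  induction ys with
  | nil => simp [PySem.List.insertBy]
  | cons y ys ih =>
    simp only [PySem.List.insertBy, List.map_cons]
    split <;> simp_all

theorem pvMapFoldlInsertBy {α β : Type} (f : α → β) (p : β → β → Bool) (xs : List α)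
    (acc : List α) :
    (xs.foldl (fun acc x => PySem.List.insertBy (fun a b => p (f a) (f b)) x acc) acc).map f
      = (xs.map f).foldl (fun a y => PySem.List.insertBy p y a) (acc.map f) := by
  induction xs generalizing acc with
  | nil => rfl
  | cons x xs ih => simp only [List.foldl_cons, List.map_cons, ih, pvMapInsertBy]

-- the sorted indices, mapped to their card values, are the descending-sorted card values
theorem pvSortedMapKey {α κ : Type} [LinearOrder κ] (xs : List α) (key : α → κ) :
    (PySem.List.sorted xs key true).map key
      = PySem.List.sorted (xs.map key) (fun x => x) true := by
  rw [PySem.List.sorted_rev_eq_foldl_insertBy, PySem.List.sorted_rev_eq_foldl_insertBy]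
  exact pvMapFoldlInsertBy key (fun u v => decide (v < u)) xs []

-- A's sorted2 with tuple key equals sorting the indices by card value
theorem pvSorted2Eq (cards : List Int) :
    PySem.List.sorted2 (PySem.List.pyRange 0 (PySem.List.len cards) 1)
      (fun i => PySem.Int.floordiv (PySem.List.pyGetD cards i 0) 4)
      (fun i => PySem.Int.mod (PySem.List.pyGetD cards i 0) 4) true
    = PySem.List.sorted (PySem.List.pyRange 0 (PySem.List.len cards) 1)
      (fun i => PySem.List.pyGetD cards i 0) true := by
  simp only [PySem.List.sorted2, PySem.List.sorted]
  congr 1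
  funext acc x
  congr 1
  funext a b
  exact pvKeyLt _ _

-- A returns the first-seen suits of the descending-sorted card list
theorem pvANormal (cards : List Int) :
    canonical_suit_order_py cards
      = PySem.Set.ofList ((PySem.List.sorted cards (fun x => x) true).map pvSuit) := by
  unfold canonical_suit_order_py
  simp only [pvSorted2Eq]
  have hbody : (fun (ordered : List Int) idx =>
      let suit := PySem.Int.mod (PySem.List.pyGetD cards idx 0) 4
      if suit ∈ ordered then ordered else ordered ++ [suit])
      = fun ordered idx => PySem.Set.add ordered (pvSuit (PySem.List.pyGetD cards idx 0)) := by
    funext ordered idx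
    simp [PySem.Set.add_eq_ite, pvSuit]
  rw [hbody, ← PySem.Set.update_map_eq_foldl_add, PySem.Set.update_nil_left,
    show (fun idx => pvSuit (PySem.List.pyGetD cards idx 0))
      = pvSuit ∘ (fun i => PySem.List.pyGetD cards i 0) from rfl,
    ← List.map_map, pvSortedMapKey, PySem.List.map_pyGetD_pyRange_zero]

-- B in terms of pvStep
theorem pvBNormal (cards : List Int) :
    canonical_suit_order_py_alt cards
      = PySem.List.sorted (cards.foldl pvStep PySem.Dict.empty).keys
          (fun s => (cards.foldl pvStep PySem.Dict.empty).getD s 0) true := rfl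

-- a best card exists for every suit that occurs
theorem pvExistsBest (l : List Int) (s : Int) (h : ∃ c ∈ l, pvSuit c = s) :
    ∃ v, pvIsBest l s v := by
  obtain ⟨c, hc, hcs⟩ := h
  have hne : l.filter (fun x => decide (pvSuit x = s)) ≠ [] := by
    intro hnil
    have : c ∈ l.filter (fun x => decide (pvSuit x = s)) := by
      simp [List.mem_filter, hc, hcs]
    simp [hnil] at this
  obtain ⟨m, hm⟩ : ∃ m, PySem.List.max? (l.filter (fun x => decide (pvSuit x = s))) (fun x => x) = some m := by
    cases hmax : PySem.List.max? (l.filter (fun x => decide (pvSuit x = s))) (fun x => x) with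
    | none => exact absurd ((PySem.List.max?_eq_none_iff _ _).1 hmax) hne
    | some m => exact ⟨m, rfl⟩
  have hmem := PySem.List.max?_mem hm
  have hmax := PySem.List.max?_isMax hm
  simp only [List.mem_filter, decide_eq_true_eq] at hmem
  refine ⟨m, hmem.1, hmem.2, fun x hx hxs => ?_⟩
  exact hmax x (by simp [List.mem_filter, hx, hxs])

theorem pvBestUnique {l : List Int} {s v w : Int} (hv : pvIsBest l s v) (hw : pvIsBest l s w) :
    v = w :=
  le_antisymm (hw.2.2 v hv.1 hv.2.1) (hv.2.2 w hw.1 hw.2.1)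

-- pvIsBest ignores an appended card of another suit
theorem pvIsBestAppendNe {l : List Int} {c s v : Int} (hs : s ≠ pvSuit c) :
    pvIsBest (l ++ [c]) s v ↔ pvIsBest l s v := by
  unfold pvIsBest
  constructor
  · rintro ⟨hv, hvs, hmax⟩
    rcases List.mem_append.1 hv with h | h
    · exact ⟨h, hvs, fun x hx hxs => hmax x (List.mem_append_left _ hx) hxs⟩
    · simp at h; subst h; exact absurd hvs.symm hs
  · rintro ⟨hv, hvs, hmax⟩
    refine ⟨List.mem_append_left _ hv, hvs, fun x hx hxs => ?_⟩
    rcases List.mem_append.1 hx with h | h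
    · exact hmax x h hxs
    · simp at h; subst h; exact absurd hxs (Ne.symm hs)

-- B's dict lookup is exactly the best card per suit
theorem pvGetChar (l : List Int) (s v : Int) :
    (l.foldl pvStep PySem.Dict.empty).get? s = some v ↔ pvIsBest l s v := by
  induction l using List.reverseRecOn generalizing s v with
  | nil => simp [PySem.Dict.get?_empty, pvIsBest]
  | append_singleton l c ih =>
    rw [List.foldl_append, List.foldl_cons, List.foldl_nil]
    set d := l.foldl pvStep PySem.Dict.empty with hd
    by_cases hs : s = pvSuit c
    · subst hs
      by_cases hcond : (!(d.contains (pvSuit c)) || decide (d.getD (pvSuit c) 0 < c)) = true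
      · have hstep : pvStep d c = d.insert (pvSuit c) c := by rw [pvStep, if_pos hcond]
        have hget : (pvStep d c).get? (pvSuit c) = some c := by
          rw [hstep, PySem.Dict.get?_insert_self]
        have hbest : pvIsBest (l ++ [c]) (pvSuit c) c := by
          refine ⟨by simp, rfl, fun x hx hxs => ?_⟩
          rcases List.mem_append.1 hx with h | h
          · have hex : ∃ w, pvIsBest l (pvSuit c) w := pvExistsBest l _ ⟨x, h, hxs⟩
            obtain ⟨w, hw⟩ := hex
            have hgw : d.get? (pvSuit c) = some w := (ih _ _).2 hw
            have hcont : d.contains (pvSuit c) = true := by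
              rcases Bool.eq_false_or_eq_true (d.contains (pvSuit c)) with ht | hf
              · exact ht
              · rw [(PySem.Dict.get?_eq_none_iff_contains d (pvSuit c)).2 hf] at hgw; cases hgw
            have hlt : d.getD (pvSuit c) 0 < c := by
              rcases Bool.or_eq_true_iff.1 hcond with h1 | h1
              · rw [Bool.not_eq_true'] at h1; rw [h1] at hcont; cases hcont
              · exact of_decide_eq_true h1
            have : d.getD (pvSuit c) 0 = w := by rw [PySem.Dict.getD_eq_get?_getD, hgw]; rfl
            have hxw := hw.2.2 x h hxs
            omega
          · simp at h; omega
        constructor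
        · intro h; rw [hget] at h; injection h with h; subst h; exact hbest
        · intro h; rw [hget, pvBestUnique h hbest]
      · have hstep : pvStep d c = d := by rw [pvStep, if_neg hcond]
        have hcont : d.contains (pvSuit c) = true := by
          rcases Bool.eq_false_or_eq_true (d.contains (pvSuit c)) with ht | hf
          · exact ht
          · exfalso; apply hcond; rw [hf]; rfl
        obtain ⟨w, hgw⟩ : ∃ w, d.get? (pvSuit c) = some w := by
          cases hg : d.get? (pvSuit c) with
          | none => rw [(PySem.Dict.get?_eq_none_iff_contains d (pvSuit c)).1 hg] at hcont; cases hcont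
          | some w => exact ⟨w, rfl⟩
        have hcw : c ≤ w := by
          have : ¬ (d.getD (pvSuit c) 0 < c) := by
            intro hlt
            apply hcond
            rw [Bool.or_eq_true_iff]; right; exact decide_eq_true hlt
          rw [PySem.Dict.getD_eq_get?_getD, hgw] at this
          simpa using this
        have hwbest := (ih (pvSuit c) w).1 hgw
        have hbest : pvIsBest (l ++ [c]) (pvSuit c) w := by
          refine ⟨List.mem_append_left _ hwbest.1, hwbest.2.1, fun x hx hxs => ?_⟩
          rcases List.mem_append.1 hx with h | h
          · exact hwbest.2.2 x h hxs
          · simp at h; omega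
        rw [hstep]
        constructor
        · intro h; rw [hgw] at h; injection h with h; subst h; exact hbest
        · intro h; rw [hgw, pvBestUnique h hbest]
    · have hget : (pvStep d c).get? s = d.get? s := by
        rw [pvStep]
        split
        · exact PySem.Dict.get?_insert_of_ne d c hs
        · rfl
      rw [hget, ih, pvIsBestAppendNe hs]

theorem pvNodupKeys (l : List Int) (d : PySem.Dict Int Int) (h : d.keys.Nodup) :
    (l.foldl pvStep d).keys.Nodup := by
  induction l generalizing d with
  | nil => exact h
  | cons c l ih =>
    simp only [List.foldl_cons, pvStep]
    split
    · exact ih _ (PySem.Dict.nodup_keys_insert _ _ _ h)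
    · exact ih _ h

-- filtering commutes with first-occurrence dedup
theorem pvOfListFilter {α : Type} [BEq α] [LawfulBEq α] (p : α → Bool) (l : List α) :
    (PySem.Set.ofList l).filter p = PySem.Set.ofList (l.filter p) := by
  induction l with
  | nil => rfl
  | cons y l ih =>
    rw [PySem.Set.ofList_cons]
    have hdis : ∀ (s : PySem.Set α), s.discard y = s.filter (fun z => !z == y) := fun _ => rfl
    by_cases hp : p y = true
    · rw [List.filter_cons_of_pos hp, hdis, List.filter_filter, show (fun a => p a && !a == y)
        = fun a => (!a == y) && p a from by funext a; exact Bool.and_comm _ _, ← List.filter_filter,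
        ih, List.filter_cons_of_pos hp, PySem.Set.ofList_cons, hdis]
    · rw [List.filter_cons_of_neg (by simp_all), hdis, List.filter_filter]
      rw [List.filter_cons_of_neg (by simp_all)] at *
      rw [← ih]
      apply List.filter_congr
      intro a _
      by_cases hay : a = y
      · subst hay; simp [hp]
      · simp [hay]

-- discarding from a dedup is deduping the filtered list
theorem pvDiscardOfList {α : Type} [BEq α] [LawfulBEq α] (y : α) (l : List α) :
    (PySem.Set.ofList l).discard y = PySem.Set.ofList (l.filter (fun z => !z == y)) :=
  pvOfListFilter _ l

-- the key pairwise lemma: the first-seen suits of a descending card list are in strictly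
-- descending order of their best card B, provided the best card of every present suit is present
theorem pvPairwise (B : Int → Int) (S : List Int) (E : List Int)
    (hp : S.Pairwise (fun a b => b ≤ a))
    (h1 : ∀ c ∈ S, pvSuit c ∉ E → c ≤ B (pvSuit c))
    (h2 : ∀ c ∈ S, pvSuit c ∉ E → ∃ b ∈ S, pvSuit b = pvSuit c ∧ B (pvSuit c) = b) :
    (PySem.Set.ofList ((S.map pvSuit).filter (fun s => decide (s ∉ E)))).Pairwise
      (fun s t => B t < B s) := by
  induction S generalizing E with
  | nil => simp
  | cons c T ih =>
    rw [List.pairwise_cons] at hp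
    obtain ⟨hhead, hT⟩ := hp
    by_cases hE : pvSuit c ∈ E
    · rw [List.map_cons, List.filter_cons_of_neg (by simp [hE])]
      refine ih E hT (fun x hx hxE => h1 x (List.mem_cons_of_mem _ hx) hxE) ?_
      intro x hx hxE
      obtain ⟨b, hb, hbs, hBb⟩ := h2 x (List.mem_cons_of_mem _ hx) hxE
      rcases List.mem_cons.1 hb with rfl | hbT
      · exact absurd (hbs ▸ hE) hxE
      · exact ⟨b, hbT, hbs, hBb⟩
    · rw [List.map_cons, List.filter_cons_of_pos (by simp [hE]), PySem.Set.ofList_cons,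
        List.pairwise_cons]
      constructor
      · intro t ht
        rw [PySem.Set.mem_discard] at ht
        obtain ⟨htmem, htne⟩ := ht
        rw [PySem.Set.mem_ofList, List.mem_filter, decide_eq_true_eq] at htmem
        obtain ⟨htmap, htE⟩ := htmem
        obtain ⟨x, hxT, hxs⟩ := List.mem_map.1 htmap
        obtain ⟨b, hb, hbs, hBb⟩ := h2 x (List.mem_cons_of_mem _ hxT) (hxs ▸ htE)
        rcases List.mem_cons.1 hb with rfl | hbT
        · exact absurd (hbs.trans hxs).symm htne
        · have hbc : b ≤ c := hhead b hbT
          have hbltc : b < c := lt_of_le_of_ne hbc (by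
            intro h; subst h; exact htne (hbs.trans hxs).symm)
          have hcB := h1 c (List.mem_cons_self) hE
          rw [hxs] at hBb
          omega
      · rw [pvDiscardOfList, List.filter_filter]
        have hpred : (fun a => (!a == pvSuit c) && decide (a ∉ E))
            = fun s => decide (s ∉ (pvSuit c :: E)) := by
          funext a
          by_cases h1' : a = pvSuit c <;> by_cases h2' : a ∈ E <;> simp [h1', h2']
        rw [hpred]
        refine ih (pvSuit c :: E) hT (fun x hx hxE => h1 x (List.mem_cons_of_mem _ hx)
          (fun h => hxE (List.mem_cons_of_mem _ h))) ?_
        intro x hx hxE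
        obtain ⟨b, hb, hbs, hBb⟩ := h2 x (List.mem_cons_of_mem _ hx)
          (fun h => hxE (List.mem_cons_of_mem _ h))
        rcases List.mem_cons.1 hb with rfl | hbT
        · exact absurd (hbs ▸ List.mem_cons_self) hxE
        · exact ⟨b, hbT, hbs, hBb⟩

-- B's sorted suit list is exactly A's dedup of the descending card list
theorem pvMain (cards : List Int) :
    PySem.List.sorted (cards.foldl pvStep PySem.Dict.empty).keys
        (fun s => (cards.foldl pvStep PySem.Dict.empty).getD s 0) true
      = PySem.Set.ofList ((PySem.List.sorted cards (fun x => x) true).map pvSuit) := by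
  set best := cards.foldl pvStep PySem.Dict.empty with hbest
  set S := PySem.List.sorted cards (fun x => x) true with hS
  have hSmem : ∀ x, x ∈ S ↔ x ∈ cards := fun x => PySem.List.mem_sorted cards _ true x
  have hgetD : ∀ s v, pvIsBest cards s v → best.getD s 0 = v := by
    intro s v hv
    rw [PySem.Dict.getD_eq_get?_getD, (pvGetChar cards s v).2 hv]; rfl
  have hkeys : ∀ x, x ∈ best.keys ↔ ∃ c ∈ cards, pvSuit c = x := by
    intro x
    constructor
    · intro hx
      cases hg : best.get? x with
      | none => exact absurd ((PySem.Dict.get?_eq_none_iff_not_mem_keys best x).1 hg) (by simp [hx])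
      | some v =>
        obtain ⟨hv, hvs, _⟩ := (pvGetChar cards x v).1 hg
        exact ⟨v, hv, hvs⟩
    · intro hx
      obtain ⟨v, hv⟩ := pvExistsBest cards x hx
      have hg := (pvGetChar cards x v).2 hv
      by_contra hmem
      rw [(PySem.Dict.get?_eq_none_iff_not_mem_keys best x).2 hmem] at hg
      cases hg
  apply PySem.List.sorted_rev_eq_of_perm_of_pairwise_gt
  · refine (List.perm_ext_iff_of_nodup (PySem.Set.nodup_ofList _)
      (pvNodupKeys cards PySem.Dict.empty (by simp [PySem.Dict.keys_empty]))).2 ?_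
    intro x
    rw [PySem.Set.mem_ofList, hkeys, List.mem_map]
    constructor
    · rintro ⟨c, hc, hcs⟩; exact ⟨c, (hSmem c).1 hc, hcs⟩
    · rintro ⟨c, hc, hcs⟩; exact ⟨c, (hSmem c).2 hc, hcs⟩
  · have hpw := pvPairwise (fun s => best.getD s 0) S []
      (by simpa using PySem.List.sorted_pairwise_rev cards (fun x => x))
      (by
        intro c hc _
        obtain ⟨v, hv⟩ := pvExistsBest cards (pvSuit c) ⟨c, (hSmem c).1 hc, rfl⟩
        show c ≤ best.getD (pvSuit c) 0
        rw [hgetD _ _ hv]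
        exact hv.2.2 c ((hSmem c).1 hc) rfl)
      (by
        intro c hc _
        obtain ⟨v, hv⟩ := pvExistsBest cards (pvSuit c) ⟨c, (hSmem c).1 hc, rfl⟩
        exact ⟨v, (hSmem v).2 hv.1, hv.2.1, show best.getD (pvSuit c) 0 = v from hgetD _ _ hv⟩)
    simpa using hpw

-- ===== VERDICT (by name: the statement is the Claim_ definition above) =====
theorem canonical_suit_order_py_spec : Claim_equal_canonical_suit_order_py := by
  intro cards _
  unfold Spec_canonical_suit_order_py
  rw [pvANormal, pvBNormal, pvMain]
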